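-- pv_equiv track=rewrite | github.com/baibhavtripathi/Python | Implementation/dict_sort.py | notfib
-- ===== SOURCE A (Python) =====
-- M = 1000000007
--
-- def fibo(n):
--     if n<0:
--         return 0
--     elif n<2:
--         return n
--     x=0
--     y=1
--     m=n
--     res=0
--     while(m>=1):
--         res = (x+y)%M
--         x = y
--         y = res
--         m-=1
--     return res
--
-- def notfib(n):
--     if n<3:
--         return 0
--     a=0
--     b=1
--     m=3
--     res=0
--     while m<n:
--         res = (a+b+fibo(n-3))%M
--         a = b
--         b=res
--         m+=1
--     return (res)
-- ===== SOURCE B (Python) =====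
-- M = 1000000007
--
-- def _fib(k):
--     # returns the k-th value of the fibo helper's indexing: fib(k+1) mod M for k >= 1
--     if k < 2:
--         return max(k, 0)
--     x, y = 0, 1
--     for _ in range(k):
--         x, y = y, (x + y) % M
--     return y
--
-- def notfib(n):
--     # the loop in A is the inhomogeneous Fibonacci recurrence; its value is fib(n-2)*fib(n-1) mod M
--     if n < 4:
--         return 0
--     return _fib(n - 3) * _fib(n - 2) % M
-- ===== Notes on version B (the rewrite author's own statement) =====
-- stated objective: faster
-- what changed: Replaced A's loop (which re-evaluates fibo(n-3) on every iteration) by the closed-form identity: the loop's value is fibo(n-3)*fibo(n-2) mod M, computed from two linear Fibonacci evaluations.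
import Mathlib
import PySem

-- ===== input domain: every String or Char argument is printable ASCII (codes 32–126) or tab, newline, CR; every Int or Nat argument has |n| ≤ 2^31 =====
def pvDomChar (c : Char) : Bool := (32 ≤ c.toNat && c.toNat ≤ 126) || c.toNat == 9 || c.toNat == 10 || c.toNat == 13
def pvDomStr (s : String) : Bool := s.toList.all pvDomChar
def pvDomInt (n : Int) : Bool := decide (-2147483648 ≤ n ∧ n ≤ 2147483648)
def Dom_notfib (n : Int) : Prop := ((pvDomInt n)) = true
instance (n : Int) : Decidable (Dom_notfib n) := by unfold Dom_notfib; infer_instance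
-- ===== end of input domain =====

-- B replaces A's O(n^2) loop (it re-evaluates fibo(n-3) each iteration) by the closed form
-- fibo(n-3)*fibo(n-2) mod M, two linear Fibonacci evaluations: faster.

-- ===== PORT A =====
def pvM : Int := 1000000007

-- the 'while(m>=1)' loop of fibo; fuel = m.toNat (m decreases by 1 each iteration)
def fiboLoopA : Nat → Int → Int → Int → Int
  | 0, _, _, res => res
  | fuel + 1, x, y, _ =>
      let r := PySem.Int.mod (x + y) pvM
      fiboLoopA fuel y r r

def fibo (n : Int) : Int :=
  if n < 0 then 0
  else if n < 2 then n
  else fiboLoopA n.toNat 0 1 0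

-- the 'while m<n' loop of notfib; fuel = (n-3).toNat (m goes 3,4,…,n-1)
def notfibLoopA : Nat → Int → Int → Int → Int → Int
  | 0, _, _, _, res => res
  | fuel + 1, a, b, n, _ =>
      let r := PySem.Int.mod (a + b + fibo (n - 3)) pvM
      notfibLoopA fuel b r n r

def notfib (n : Int) : Int :=
  if n < 3 then 0
  else notfibLoopA (n - 3).toNat 0 1 n 0

-- ===== PORT B =====
-- Source B's _fib: pair iteration 'for _ in range(k): x, y = y, (x+y) % M'
def fibLoopB : Nat → Int × Int → Int × Int
  | 0, p => p
  | fuel + 1, (x, y) => fibLoopB fuel (y, PySem.Int.mod (x + y) pvM)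

def fibB (k : Int) : Int :=
  if k < 2 then max k 0
  else (fibLoopB k.toNat (0, 1)).2

def notfib_alt (n : Int) : Int :=
  if n < 4 then 0
  else PySem.Int.mod (fibB (n - 3) * fibB (n - 2)) pvM

-- ===== PRECONDITION & SPEC =====
def Spec_notfib (n : Int) (out : Int) : Prop := out = notfib_alt n
instance (n : Int) (out : Int) : Decidable (Spec_notfib n out) := by unfold Spec_notfib; infer_instance

-- ===== CLAIM (what is proved, stated in full; the proofs are below) =====
def Claim_equal_notfib : Prop := ∀ (n : Int), Dom_notfib n → Spec_notfib n (notfib n)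

-- ===== LEMMAS AND PROOFS =====

theorem pvM_pos : (0:Int) < pvM := by decide

theorem pymod_eq (a : Int) : PySem.Int.mod a pvM = a % pvM := by
  exact PySem.Int.mod_eq_emod_of_pos pvM_pos

theorem emod_modEq (a : Int) : a % pvM ≡ a [ZMOD pvM] :=
  Int.emod_emod_of_dvd a dvd_rfl

theorem add2_emod (x y : Int) : (x % pvM + y % pvM) % pvM = (x + y) % pvM :=
  (emod_modEq x).add (emod_modEq y)

theorem add3_emod (x y z : Int) : (x % pvM + y % pvM + z) % pvM = (x + y + z) % pvM :=
  ((emod_modEq x).add (emod_modEq y)).add_right z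

theorem fib_step (j : Nat) :
    PySem.Int.mod ((Nat.fib j : Int) % pvM + (Nat.fib (j+1) : Int) % pvM) pvM
      = (Nat.fib (j + 2) : Int) % pvM := by
  rw [pymod_eq, add2_emod, Nat.fib_add_two]
  push_cast
  ring_nf

-- A's fibo loop computes Fibonacci numbers mod M
theorem fiboLoopA_fib (fuel : Nat) : ∀ (j : Nat) (res : Int),
    fiboLoopA (fuel + 1) ((Nat.fib j : Int) % pvM) ((Nat.fib (j+1) : Int) % pvM) res
      = (Nat.fib (j + fuel + 2) : Int) % pvM := by
  induction fuel with
  | zero =>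
      intro j res
      simp only [fiboLoopA]
      rw [fib_step j]
  | succ f ih =>
      intro j res
      show fiboLoopA (f + 1) ((Nat.fib (j+1) : Int) % pvM)
          (PySem.Int.mod ((Nat.fib j : Int) % pvM + (Nat.fib (j+1) : Int) % pvM) pvM)
          (PySem.Int.mod ((Nat.fib j : Int) % pvM + (Nat.fib (j+1) : Int) % pvM) pvM) = _
      rw [fib_step j, ih (j + 1)]
      have e : j + 1 + f + 2 = j + (f + 1) + 2 := by omega
      rw [e]

theorem fibo_eq (n : Int) (hn : 1 ≤ n) :
    fibo n = (Nat.fib (n.toNat + 1) : Int) % pvM := by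
  unfold fibo
  rcases lt_or_ge n 2 with h | h
  · have h1 : n = 1 := by omega
    subst h1; decide
  · have h0 : ¬ n < 0 := by omega
    have h2 : ¬ n < 2 := by omega
    simp only [h0, h2, if_false]
    obtain ⟨f, hf⟩ : ∃ f, n.toNat = f + 1 := ⟨n.toNat - 1, by omega⟩
    rw [hf]
    have h := fiboLoopA_fib f 0 0
    have e0 : ((Nat.fib 0 : Int)) % pvM = 0 := by decide
    have e1 : ((Nat.fib 1 : Int)) % pvM = 1 := by decide
    rw [e0, e1] at h
    rw [h]
    have e : 0 + f + 2 = f + 1 + 1 := by omega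
    rw [e]

-- B's _fib loop carries consecutive Fibonacci pairs mod M
theorem fibLoopB_fib (fuel : Nat) : ∀ (j : Nat),
    fibLoopB fuel ((Nat.fib j : Int) % pvM, (Nat.fib (j+1) : Int) % pvM)
      = ((Nat.fib (j + fuel) : Int) % pvM, (Nat.fib (j + fuel + 1) : Int) % pvM) := by
  induction fuel with
  | zero => intro j; simp [fibLoopB]
  | succ f ih =>
      intro j
      show fibLoopB f ((Nat.fib (j+1) : Int) % pvM,
          PySem.Int.mod ((Nat.fib j : Int) % pvM + (Nat.fib (j+1) : Int) % pvM) pvM) = _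
      rw [fib_step j, ih (j + 1)]
      have e : j + 1 + f = j + (f + 1) := by omega
      rw [e]

theorem fibB_eq (n : Int) (hn : 1 ≤ n) :
    fibB n = (Nat.fib (n.toNat + 1) : Int) % pvM := by
  unfold fibB
  rcases lt_or_ge n 2 with h | h
  · have h1 : n = 1 := by omega
    subst h1; decide
  · have h2 : ¬ n < 2 := by omega
    simp only [h2, if_false]
    have h := fibLoopB_fib n.toNat 0
    have e0 : ((Nat.fib 0 : Int)) % pvM = 0 := by decide
    have e1 : ((Nat.fib (0 + 1) : Int)) % pvM = 1 := by decide
    rw [e0, e1] at h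
    rw [h]
    have e : 0 + n.toNat + 1 = n.toNat + 1 := by omega
    rw [e]

-- the exact (integer) solution of A's inhomogeneous recurrence r_{j+2} = r_{j+1} + r_j + c
def X (c : Int) (j : Nat) : Int := c * Nat.fib j + (1 + c) * Nat.fib (j + 1) - c

theorem X_rec (c : Int) (j : Nat) : X c (j + 2) = X c j + X c (j + 1) + c := by
  unfold X
  rw [Nat.fib_add_two (n := j + 1), Nat.fib_add_two (n := j)]
  push_cast; ring

-- A's notfib loop, measured against X (c = the constant value fibo(n-3))
theorem notfibLoopA_X (n : Int) (fuel : Nat) : ∀ (j : Nat),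
    notfibLoopA fuel (X (fibo (n-3)) j % pvM) (X (fibo (n-3)) (j+1) % pvM) n
        (X (fibo (n-3)) (j+1) % pvM)
      = X (fibo (n-3)) (j + 1 + fuel) % pvM := by
  induction fuel with
  | zero => intro j; simp [notfibLoopA]
  | succ f ih =>
      intro j
      show notfibLoopA f (X (fibo (n-3)) (j+1) % pvM)
          (PySem.Int.mod (X (fibo (n-3)) j % pvM + X (fibo (n-3)) (j+1) % pvM + fibo (n-3)) pvM) n
          (PySem.Int.mod (X (fibo (n-3)) j % pvM + X (fibo (n-3)) (j+1) % pvM + fibo (n-3)) pvM) = _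
      have h : PySem.Int.mod (X (fibo (n-3)) j % pvM + X (fibo (n-3)) (j+1) % pvM + fibo (n-3)) pvM
          = X (fibo (n-3)) (j + 2) % pvM := by
        rw [pymod_eq, add3_emod, X_rec]
      rw [h, ih (j + 1)]
      have e : j + 1 + 1 + f = j + 1 + (f + 1) := by omega
      rw [e]

-- closed form: X c (f+1) ≡ fib(f+2)·fib(f+3) mod M when c = fib(f+2) % M
theorem X_closed (f : Nat) :
    X ((Nat.fib (f+2) : Int) % pvM) (f+1) % pvM
      = ((Nat.fib (f+2) : Int) % pvM * ((Nat.fib (f+3) : Int) % pvM)) % pvM := by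
  have hfib : Nat.fib (f+3) = Nat.fib (f+1) + Nat.fib (f+2) := by
    have e : f + 3 = (f + 1) + 2 := by omega
    rw [e, Nat.fib_add_two]
  have hpe : ((Nat.fib (f+2) : Int) % pvM) ≡ (Nat.fib (f+2) : Int) [ZMOD pvM] := emod_modEq _
  have hqe : ((Nat.fib (f+3) : Int) % pvM) ≡ (Nat.fib (f+3) : Int) [ZMOD pvM] := emod_modEq _
  have h1 : X ((Nat.fib (f+2) : Int) % pvM) (f+1) ≡ X (Nat.fib (f+2) : Int) (f+1) [ZMOD pvM] := by
    unfold X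
    exact (((hpe.mul_right _).add (((Int.ModEq.refl 1).add hpe).mul_right _)).sub hpe)
  have h2 : X (Nat.fib (f+2) : Int) (f+1) = (Nat.fib (f+2) : Int) * (Nat.fib (f+3) : Int) := by
    unfold X
    have e : f + 1 + 1 = f + 2 := by omega
    rw [e, hfib]
    push_cast; ring
  have h3 : ((Nat.fib (f+2) : Int) % pvM) * ((Nat.fib (f+3) : Int) % pvM)
      ≡ (Nat.fib (f+2) : Int) * (Nat.fib (f+3) : Int) [ZMOD pvM] := hpe.mul hqe
  calc X ((Nat.fib (f+2) : Int) % pvM) (f+1) % pvM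
      = ((Nat.fib (f+2) : Int) * (Nat.fib (f+3) : Int)) % pvM := by rw [← h2]; exact h1
    _ = ((Nat.fib (f+2) : Int) % pvM * ((Nat.fib (f+3) : Int) % pvM)) % pvM := h3.symm

-- ===== VERDICT (by name: the statement is the Claim_ definition above) =====
theorem notfib_spec : Claim_equal_notfib := by
  unfold Claim_equal_notfib
  intro n _
  unfold Spec_notfib notfib notfib_alt
  rcases lt_or_ge n 4 with h4 | h4
  · -- n < 4: A's loop runs zero times (res stays 0), B returns 0
    rcases lt_or_ge n 3 with h3 | h3
    · simp [h3, h4]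
    · have hn3 : n = 3 := by omega
      subst hn3; decide
  · have h3 : ¬ n < 3 := by omega
    have h4' : ¬ n < 4 := by omega
    simp only [h3, h4', if_false]
    obtain ⟨f, hf⟩ : ∃ f, (n - 3).toNat = f + 1 := ⟨(n - 4).toNat, by omega⟩
    rw [hf]
    show notfibLoopA f 1 (PySem.Int.mod (0 + 1 + fibo (n-3)) pvM) n
        (PySem.Int.mod (0 + 1 + fibo (n-3)) pvM) = _
    have h1 : (1 : Int) = X (fibo (n-3)) 0 % pvM := by
      unfold X
      norm_num [Nat.fib_zero, Nat.fib_one]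
      decide
    have hstate : PySem.Int.mod (0 + 1 + fibo (n-3)) pvM = X (fibo (n-3)) 1 % pvM := by
      rw [pymod_eq]
      unfold X
      norm_num [Nat.fib_one, Nat.fib_two]
    rw [hstate]
    conv_lhs => rw [h1]
    rw [notfibLoopA_X n f 0]
    have e01 : 0 + 1 + f = f + 1 := by omega
    rw [e01]
    have hcval : fibo (n-3) = (Nat.fib (f+2) : Int) % pvM := by
      rw [fibo_eq (n-3) (by omega), hf]
    have hB3 : fibB (n-3) = (Nat.fib (f+2) : Int) % pvM := by
      rw [fibB_eq (n-3) (by omega), hf]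
    have hB2 : fibB (n-2) = (Nat.fib (f+3) : Int) % pvM := by
      rw [fibB_eq (n-2) (by omega)]
      have e : (n - 2).toNat = f + 2 := by omega
      rw [e]
    rw [pymod_eq, hB3, hB2, hcval, X_closed f]
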